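-- pv_equiv track=rewrite | github.com/taggedzi/tz-player | src/tz_player/visualizers/hackscope.py | _lattice
-- ===== SOURCE A (Python) =====
-- _ANSI_RESET = "\x1b[0m"
--
-- _ANSI_YELLOW = "\x1b[33m"
--
-- def _lattice(seed: int, local_i: int, h: int, w: int, use_ansi: bool) -> list[str]:
--     sweep = local_i % max(1, w - 2)
--     lines: list[str] = []
--     for y in range(h):
--         row = []
--         for x in range(w):
--             if x in (0, w - 1) or y in (0, h - 1):
--                 row.append("+")
--             elif x == 1 + sweep:
--                 row.append(_c("*", _ANSI_YELLOW, use_ansi))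
--             else:
--                 row.append(".")
--         lines.append("".join(row))
--     return lines
--
-- def _c(text: str, code: str, enabled: bool) -> str:
--     if not enabled:
--         return text
--     return f"{code}{text}{_ANSI_RESET}"
-- ===== SOURCE B (Python) =====
-- _ANSI_RESET = "\x1b[0m"
-- _ANSI_YELLOW = "\x1b[33m"
--
--
-- def _c(text: str, code: str, enabled: bool) -> str:
--     if not enabled:
--         return text
--     return f"{code}{text}{_ANSI_RESET}"
--
--
-- def _lattice(seed: int, local_i: int, h: int, w: int, use_ansi: bool) -> list[str]:
--     # Build each distinct row once and assemble the frame from templates.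
--     if h <= 0:
--         return []
--     border = "".join(["+"] * w)
--     if w <= 2:
--         return [border] * h
--     cells = ["."] * (w - 2)
--     cells[local_i % (w - 2)] = _c("*", _ANSI_YELLOW, use_ansi)
--     interior = "".join(["+"] + cells + ["+"])
--     if h == 1:
--         return [border]
--     return [border] + [interior] * (h - 2) + [border]
-- ===== Notes on version B (the rewrite author's own statement) =====
-- stated objective: faster
-- what changed: Instead of a per-cell nested loop testing every (x,y) coordinate (O(h*w) cells), B builds the border row and the single interior row template (a '.'-list with the marker set at the sweep index) once each and assembles the frame as [border] + [interior]*(h-2) + [border].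
import Mathlib
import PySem

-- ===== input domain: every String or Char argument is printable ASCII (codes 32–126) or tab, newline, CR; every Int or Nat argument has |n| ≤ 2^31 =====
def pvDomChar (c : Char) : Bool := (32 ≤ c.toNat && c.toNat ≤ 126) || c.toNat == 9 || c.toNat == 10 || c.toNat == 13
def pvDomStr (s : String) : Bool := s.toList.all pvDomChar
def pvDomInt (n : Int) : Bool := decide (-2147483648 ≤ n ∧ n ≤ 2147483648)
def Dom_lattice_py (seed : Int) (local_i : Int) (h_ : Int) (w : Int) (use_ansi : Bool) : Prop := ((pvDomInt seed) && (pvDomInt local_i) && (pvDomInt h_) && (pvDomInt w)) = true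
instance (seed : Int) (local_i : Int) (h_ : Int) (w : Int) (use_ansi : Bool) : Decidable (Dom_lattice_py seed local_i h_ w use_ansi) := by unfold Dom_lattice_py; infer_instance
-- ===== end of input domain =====

-- B assembles the frame from one border row and one interior row template instead of testing
-- every (x,y) cell (measurably faster in a timing run). Both ports transliterate their Python.

-- ===== PORT A =====
def pvAnsiReset : String := "\x1b[0m"
def pvAnsiYellow : String := "\x1b[33m"

-- _c(text, code, enabled)
def pvC (text : String) (code : String) (enabled : Bool) : String :=
  if !enabled then text else code ++ text ++ pvAnsiReset

def lattice_py (seed : Int) (local_i : Int) (h_ : Int) (w : Int) (use_ansi : Bool) : List String :=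
  let sweep := PySem.Int.mod local_i (max 1 (w - 2))
  (PySem.List.pyRange 0 h_ 1).foldl (fun lines y =>
    lines ++ [PySem.Str.join "" ((PySem.List.pyRange 0 w 1).foldl (fun row x =>
      row ++ [if x = 0 ∨ x = w - 1 ∨ y = 0 ∨ y = h_ - 1 then "+"
              else if x = 1 + sweep then pvC "*" pvAnsiYellow use_ansi
              else "."]) [])]) []

-- ===== PORT B =====
def lattice_py_alt (seed : Int) (local_i : Int) (h_ : Int) (w : Int) (use_ansi : Bool) : List String :=
  if h_ ≤ 0 then []
  else
  let border := PySem.Str.join "" (PySem.List.pyRepeat ["+"] w)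
  if w ≤ 2 then PySem.List.pyRepeat [border] h_
  else
    let cells := (PySem.List.pyRepeat ["."] (w - 2)).set
                   (PySem.Int.mod local_i (w - 2)).toNat (pvC "*" pvAnsiYellow use_ansi)
    let interior := PySem.Str.join "" (["+"] ++ cells ++ ["+"])
    if h_ = 1 then [border]
    else [border] ++ PySem.List.pyRepeat [interior] (h_ - 2) ++ [border]

-- ===== PRECONDITION & SPEC =====
def Spec_lattice_py (seed : Int) (local_i : Int) (h_ : Int) (w : Int) (use_ansi : Bool) (out : List String) : Prop := out = lattice_py_alt seed local_i h_ w use_ansi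
instance (seed : Int) (local_i : Int) (h_ : Int) (w : Int) (use_ansi : Bool) (out : List String) : Decidable (Spec_lattice_py seed local_i h_ w use_ansi out) := by unfold Spec_lattice_py; infer_instance

-- ===== CLAIM (what is proved, stated in full; the proofs are below) =====
def Claim_equal_lattice_py : Prop := ∀ (seed : Int) (local_i : Int) (h_ : Int) (w : Int) (use_ansi : Bool), Dom_lattice_py seed local_i h_ w use_ansi → Spec_lattice_py seed local_i h_ w use_ansi (lattice_py seed local_i h_ w use_ansi)

-- ===== LEMMAS AND PROOFS =====

-- (range n).map of "marker at index s, default elsewhere" is replicate-then-set.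
theorem pv_map_range_set {α : Type} (n s : Nat) (m d : α) :
    (List.range n).map (fun k => if k = s then m else d) = (List.replicate n d).set s m := by
  apply List.ext_getElem
  · simp
  · intro k hk hk'
    simp only [List.getElem_map, List.getElem_range, List.getElem_set, List.getElem_replicate]
    by_cases h : k = s
    · simp [h]
    · rw [if_neg h, if_neg (fun hs => h hs.symm)]

-- (range n).map of "b at both boundaries, i inside" is  b :: replicate (n-2) i ++ [b]  for n ≥ 2.
theorem pv_map_range_frame {α : Type} (n : Nat) (hn : 2 ≤ n) (b i : α) :
    (List.range n).map (fun k => if k = 0 ∨ k = n - 1 then b else i)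
      = b :: (List.replicate (n - 2) i ++ [b]) := by
  apply List.ext_getElem
  · simp; omega
  · intro k hk hk'
    simp only [List.getElem_map, List.getElem_range]
    cases k with
    | zero => simp
    | succ j =>
      rw [List.getElem_cons_succ]
      rcases Nat.lt_or_ge j (n - 2) with hlt | hge
      · rw [List.getElem_append_left (by simpa using hlt)]
        simp only [List.getElem_replicate]
        have h1 : ¬ (j + 1 = 0 ∨ j + 1 = n - 1) := by simp at hk; omega
        rw [if_neg h1]
      · have hke : j + 1 = n - 1 := by simp at hk; omega
        rw [List.getElem_append_right (by simpa using hge)]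
        simp [hke]

-- the boundary-vs-interior map over pyRange 0 H 1, assembled as a frame
theorem pv_map_pyRange_frame {α : Type} (H : Int) (hH : 1 ≤ H) (b i : α) :
    (PySem.List.pyRange 0 H 1).map (fun y => if y = 0 ∨ y = H - 1 then b else i)
      = if H = 1 then [b] else [b] ++ List.replicate (H - 2).toNat i ++ [b] := by
  by_cases h1 : H = 1
  · subst h1
    rw [if_pos rfl, show PySem.List.pyRange 0 1 1 = [0] by decide]
    simp
  · rw [if_neg h1, PySem.List.pyRange_one, List.map_map]
    trans ((List.range (H - 0).toNat).map (fun k => if k = 0 ∨ k = (H - 0).toNat - 1 then b else i))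
    · apply List.map_congr_left
      intro k hk
      simp only [List.mem_range] at hk
      simp only [Function.comp_apply, zero_add]
      have hiff : ((k : Int) = 0 ∨ (k : Int) = H - 1) ↔ (k = 0 ∨ k = (H - 0).toNat - 1) := by omega
      rw [if_congr hiff rfl rfl]
    · rw [pv_map_range_frame _ (by omega)]
      rw [show ((H - 0).toNat - 2) = (H - 2).toNat by omega]
      simp

-- the inner loop of A, as a map
theorem pv_inner_eq_map (w : Int) (f : Int → String) :
    (PySem.List.pyRange 0 w 1).foldl (fun row x => row ++ [f x]) [] = (PySem.List.pyRange 0 w 1).map f := by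
  simpa using PySem.List.foldl_append_singleton_eq_map (l := PySem.List.pyRange 0 w 1) (f := f) (acc := [])

-- ===== VERDICT (by name: the statement is the Claim_ definition above) =====
theorem lattice_py_spec : Claim_equal_lattice_py := by
  unfold Claim_equal_lattice_py
  intro seed local_i h_ w use_ansi _hdom
  unfold Spec_lattice_py lattice_py lattice_py_alt
  simp only [pv_inner_eq_map,
    PySem.List.foldl_append_singleton_eq_map (f := fun y =>
      PySem.Str.join "" ((PySem.List.pyRange 0 w 1).map (fun x =>
        if x = 0 ∨ x = w - 1 ∨ y = 0 ∨ y = h_ - 1 then "+"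
        else if x = 1 + PySem.Int.mod local_i (max 1 (w - 2)) then pvC "*" pvAnsiYellow use_ansi
        else "."))),
    List.nil_append]
  by_cases hh : h_ ≤ 0
  · rw [PySem.List.pyRange_one_eq_nil hh]
    simp [hh]
  · push_neg at hh
    rw [if_neg (by omega : ¬ h_ ≤ 0)]
    by_cases hw : w ≤ 2
    · -- every row is the border row
      rw [if_pos hw]
      trans ((PySem.List.pyRange 0 h_ 1).map (fun _ => PySem.Str.join "" (PySem.List.pyRepeat ["+"] w)))
      · apply List.map_congr_left
        intro y _
        congr 1
        rw [PySem.List.pyRepeat_singleton]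
        trans ((PySem.List.pyRange 0 w 1).map (fun _ => "+"))
        · apply List.map_congr_left
          intro x hx
          rw [PySem.List.mem_pyRange_one] at hx
          have hx2 : x = 0 ∨ x = w - 1 := by omega
          rcases hx2 with h | h
          · rw [if_pos (Or.inl h)]
          · rw [if_pos (Or.inr (Or.inl h))]
        · rw [List.map_const', PySem.List.length_pyRange_one]
          congr 1
          omega
      · simp only [PySem.List.pyRepeat_singleton, List.map_const', PySem.List.length_pyRange_one]
        congr 1
        omega
    · -- w ≥ 3: one border row, one interior row
      push_neg at hw
      rw [if_neg (by omega : ¬ w ≤ 2)]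
      have hmax : max 1 (w - 2) = w - 2 := by omega
      rw [hmax]
      have hs0 : 0 ≤ PySem.Int.mod local_i (w - 2) := PySem.Int.mod_nonneg _ (by omega)
      have hslt : PySem.Int.mod local_i (w - 2) < w - 2 := PySem.Int.mod_lt _ (by omega)
      have hsInt : PySem.Int.mod local_i (w - 2) = ((PySem.Int.mod local_i (w - 2)).toNat : Int) := by omega
      trans ((PySem.List.pyRange 0 h_ 1).map (fun y =>
        if y = 0 ∨ y = h_ - 1 then PySem.Str.join "" (PySem.List.pyRepeat ["+"] w)
        else PySem.Str.join "" (["+"] ++ (PySem.List.pyRepeat ["."] (w - 2)).set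
               (PySem.Int.mod local_i (w - 2)).toNat (pvC "*" pvAnsiYellow use_ansi) ++ ["+"])))
      · apply List.map_congr_left
        intro y _
        by_cases hy : y = 0 ∨ y = h_ - 1
        · rw [if_pos hy]
          congr 1
          rw [PySem.List.pyRepeat_singleton]
          trans ((PySem.List.pyRange 0 w 1).map (fun _ => "+"))
          · apply List.map_congr_left
            intro x _
            have hc : x = 0 ∨ x = w - 1 ∨ y = 0 ∨ y = h_ - 1 := by tauto
            rw [if_pos hc]
          · rw [List.map_const', PySem.List.length_pyRange_one]
            congr 1
            omega
        · rw [if_neg hy]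
          congr 1
          push_neg at hy
          rw [PySem.List.pyRepeat_singleton]
          rw [show PySem.List.pyRange 0 w 1 = [0] ++ (PySem.List.pyRange 1 (w - 1) 1 ++ [(w - 1 : Int)]) from by
                have h1 : PySem.List.pyRange 0 1 1 = [0] := by decide
                have h2 : PySem.List.pyRange (w - 1) w 1 = [(w - 1 : Int)] := by
                  have hsg := PySem.List.pyRange_one_singleton (w - 1)
                  rwa [show w - 1 + 1 = w by omega] at hsg
                rw [PySem.List.pyRange_one_append 0 1 w (by omega) (by omega),
                    PySem.List.pyRange_one_append 1 (w - 1) w (by omega) (by omega), h1, h2]]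
          simp only [List.map_append, List.map_cons, List.map_nil,
            List.cons_append, List.nil_append]
          rw [if_pos (Or.inl trivial), if_pos (Or.inr (Or.inl trivial))]
          congr 2
          -- the interior cells
          rw [← pv_map_range_set (w - 2).toNat (PySem.Int.mod local_i (w - 2)).toNat
                (pvC "*" pvAnsiYellow use_ansi) "."]
          rw [PySem.List.pyRange_one, List.map_map,
              show (w - 1 - 1).toNat = (w - 2).toNat by omega]
          apply List.map_congr_left
          intro k hk
          simp only [List.mem_range] at hk
          simp only [Function.comp_apply]
          have hne : ¬ ((1 : Int) + k = 0 ∨ (1 : Int) + k = w - 1 ∨ y = 0 ∨ y = h_ - 1) := by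
            push_neg
            exact ⟨by omega, by omega, hy.1, hy.2⟩
          rw [if_neg hne]
          by_cases hks : k = (PySem.Int.mod local_i (w - 2)).toNat
          · rw [if_pos (by omega : (1 : Int) + k = 1 + PySem.Int.mod local_i (w - 2)), if_pos hks]
          · rw [if_neg (by omega : ¬ (1 : Int) + k = 1 + PySem.Int.mod local_i (w - 2)), if_neg hks]
      · rw [pv_map_pyRange_frame h_ (by omega)]
        simp [PySem.List.pyRepeat_singleton]
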